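-- pv_equiv track=rewrite | github.com/1163710215/compiler | MainLogic/Scanner.py | readComments
-- ===== SOURCE A (Python) =====
-- def readComments(prog):
--     '''Read the comments of a program'''
--     state = 0
--     currentIndex, beginIndex, endIndex = (0, 0, 0)
--     commentsIndexs = []
--     for c in prog:
--         if state == 0:
--             if c == '/':
--                 beginIndex = currentIndex
--                 state = 1
--             else:
--                 pass
--         elif state == 1:
--             if c == '*':
--                 state = 2
--             elif c == '/':
--                 state = 4
--             else:
--                 state = 0
--         elif state == 2:
--             if c == '*':
--                 state = 3
--             else:
--                 pass
--         elif state == 3: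
--             if c == '*':
--                 pass
--             elif c == '/':
--                 endIndex = currentIndex
--                 commentsIndexs.append([beginIndex, endIndex])
--                 state = 0  # set 0 state
--             else:
--                 state = 2
--         elif state == 4:
--             if c == '\n':
--                 endIndex = currentIndex
--                 commentsIndexs.append([beginIndex, endIndex])
--                 state = 0  # set 0 state
--             else:
--                 pass
--         currentIndex += 1
--     if state == 4:
--         endIndex = currentIndex
--         commentsIndexs.append([beginIndex, endIndex])
--     return commentsIndexs
-- ===== SOURCE B (Python) =====
-- def readComments(prog):
--     '''Read the comments of a program'''
--     res = []
--     i, n = 0, len(prog)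
--     while i < n:
--         if prog[i] != '/':
--             i += 1
--         elif i + 1 < n and prog[i + 1] == '*':
--             m = prog.find('*/', i + 2)
--             if m == -1:
--                 break
--             res.append([i, m + 1])
--             i = m + 2
--         elif i + 1 < n and prog[i + 1] == '/':
--             nl = prog.find('\n', i + 2)
--             e = nl if nl != -1 else n
--             res.append([i, e])
--             i = e + 1
--         else:
--             i += 2
--     return res
-- ===== Notes on version B (the rewrite author's own statement) =====
-- stated objective: simpler
-- what changed: Replaced the five-state character-by-character FSM with an index-driven scan that jumps between comment delimiters using str.find, appending each span directly.
import Mathlib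
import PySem

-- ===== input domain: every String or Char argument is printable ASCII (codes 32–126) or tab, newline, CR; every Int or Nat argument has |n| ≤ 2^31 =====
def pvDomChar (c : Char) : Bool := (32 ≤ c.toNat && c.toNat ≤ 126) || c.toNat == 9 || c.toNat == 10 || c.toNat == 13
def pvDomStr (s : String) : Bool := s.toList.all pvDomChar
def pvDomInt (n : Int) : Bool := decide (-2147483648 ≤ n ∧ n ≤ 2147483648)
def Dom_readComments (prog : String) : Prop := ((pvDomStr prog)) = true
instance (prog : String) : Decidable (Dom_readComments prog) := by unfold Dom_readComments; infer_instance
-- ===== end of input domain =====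

-- B replaces A's five-state character-by-character FSM by an index scan that jumps
-- between comment delimiters with str.find (objective: simpler/idiomatic).

-- ===== PORT A =====
-- A's for-loop as the obvious structural recursion over the characters, carrying
-- (state, currentIndex, beginIndex, endIndex, commentsIndexs); the trailing
-- 'if state == 4' check is the [] case.
def aLoop (cs : List Char) (state currentIndex beginIndex endIndex : Int)
    (acc : List (List Int)) : List (List Int) :=
  match cs with
  | [] => if state = 4 then acc ++ [[beginIndex, currentIndex]] else acc
  | c :: rest =>
    if state = 0 then
      if c = '/' then aLoop rest 1 (currentIndex+1) currentIndex endIndex acc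
      else aLoop rest 0 (currentIndex+1) beginIndex endIndex acc
    else if state = 1 then
      if c = '*' then aLoop rest 2 (currentIndex+1) beginIndex endIndex acc
      else if c = '/' then aLoop rest 4 (currentIndex+1) beginIndex endIndex acc
      else aLoop rest 0 (currentIndex+1) beginIndex endIndex acc
    else if state = 2 then
      if c = '*' then aLoop rest 3 (currentIndex+1) beginIndex endIndex acc
      else aLoop rest 2 (currentIndex+1) beginIndex endIndex acc
    else if state = 3 then
      if c = '*' then aLoop rest 3 (currentIndex+1) beginIndex endIndex acc
      else if c = '/' then
        aLoop rest 0 (currentIndex+1) beginIndex currentIndex (acc ++ [[beginIndex, currentIndex]])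
      else aLoop rest 2 (currentIndex+1) beginIndex endIndex acc
    else
      if c = '\n' then
        aLoop rest 0 (currentIndex+1) beginIndex currentIndex (acc ++ [[beginIndex, currentIndex]])
      else aLoop rest 4 (currentIndex+1) beginIndex endIndex acc

def readComments (prog : String) : List (List Int) :=
  aLoop prog.toList 0 0 0 0 []

-- ===== PORT B =====
-- Source B's while-loop over an index i; prog.find(sub, i+2) is PySem.Chars.findFrom
def bLoop (s : List Char) (i : Nat) (acc : List (List Int)) : List (List Int) :=
  if h : i < s.length then
    if s[i] ≠ '/' then bLoop s (i+1) acc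
    else if h2 : i + 1 < s.length then
      if s[i+1] = '*' then
        let m := PySem.Chars.findFrom s ['*', '/'] ((i+2 : Nat) : Int)
        if hm : m = -1 then acc
        else bLoop s (m.toNat + 2) (acc ++ [[(i : Int), m + 1]])
      else if s[i+1] = '/' then
        let nl := PySem.Chars.findFrom s ['\n'] ((i+2 : Nat) : Int)
        let e : Int := if nl ≠ -1 then nl else (s.length : Int)
        bLoop s (e.toNat + 1) (acc ++ [[(i : Int), e]])
      else bLoop s (i+2) acc
    else bLoop s (i+2) acc
  else acc
termination_by s.length - i
decreasing_by
  all_goals try omega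
  · have hk : i + 2 ≤ s.length := by omega
    have hspec := PySem.Chars.findFrom_natCast_spec s ['*', '/'] (i+2) hk hm
    omega
  · split
    · rename_i hnl
      have hk : i + 2 ≤ s.length := by omega
      have hspec := PySem.Chars.findFrom_natCast_spec s ['\n'] (i+2) hk hnl
      omega
    · omega

def readComments_alt (prog : String) : List (List Int) :=
  bLoop prog.toList 0 []

-- ===== PRECONDITION & SPEC =====
def Spec_readComments (prog : String) (out : List (List Int)) : Prop := out = readComments_alt prog
instance (prog : String) (out : List (List Int)) : Decidable (Spec_readComments prog out) := by unfold Spec_readComments; infer_instance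

-- ===== CLAIM (what is proved, stated in full; the proofs are below) =====
def Claim_equal_readComments : Prop := ∀ (prog : String), Dom_readComments prog → Spec_readComments prog (readComments prog)

-- ===== LEMMAS AND PROOFS =====

-- first index j with sub <+: cs.drop j: a proof-side mirror of str.find
def seekIdx (sub : List Char) : List Char → Option Nat
  | [] => none
  | c :: t => if sub.isPrefixOf (c :: t) then some 0 else (seekIdx sub t).map (· + 1)

theorem seekIdx_cons (sub : List Char) (c : Char) (t : List Char) :
    seekIdx sub (c :: t) = if sub <+: (c :: t) then some 0 else (seekIdx sub t).map (· + 1) := by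
  simp [seekIdx, List.isPrefixOf_iff_prefix]

def seek3 : List Char → Option Nat
  | [] => none
  | c :: t =>
    if c = '/' then some 0
    else if c = '*' then (seek3 t).map (· + 1)
    else (seekIdx ['*', '/'] t).map (· + 2)

theorem seekIdx_star (t : List Char) : seekIdx ['*', '/'] ('*' :: t) = seek3 t := by
  induction t with
  | nil => rfl
  | cons c u ih =>
    rw [seekIdx_cons] at ih ⊢
    by_cases hc1 : c = '/'
    · subst hc1
      simp [seek3, List.cons_prefix_cons]
    · by_cases hc2 : c = '*'
      · subst hc2
        simp only [seek3, if_neg (by decide : ¬ ('*' : Char) = '/'), if_pos rfl]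
        rw [← ih]
        simp [List.cons_prefix_cons, seekIdx_cons]
      · simp only [seek3, if_neg hc1, if_neg hc2]
        rw [seekIdx_cons]
        simp only [List.cons_prefix_cons,
          if_neg (show ¬('*' = c ∧ ['/'] <+: u) from fun h => hc2 h.1.symm), Option.map_map]
        rw [if_neg (show ¬(True ∧ '/' = c ∧ ([] : List Char) <+: u) from fun h => hc1 h.2.1.symm)]
        rfl

theorem aLoop_state23 (cs : List Char) :
    (∀ (i : Nat) (b e : Int) (acc : List (List Int)), aLoop cs 2 (i : Int) b e acc =
      (match seekIdx ['*', '/'] cs with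
       | none => acc
       | some j => aLoop (cs.drop (j+2)) 0 ((i+j+2 : Nat) : Int) b ((i+j+1 : Nat) : Int)
           (acc ++ [[b, ((i+j+1 : Nat) : Int)]]))) ∧
    (∀ (i : Nat) (b e : Int) (acc : List (List Int)), aLoop cs 3 (i : Int) b e acc =
      (match seek3 cs with
       | none => acc
       | some j => aLoop (cs.drop (j+1)) 0 ((i+j+1 : Nat) : Int) b ((i+j : Nat) : Int)
           (acc ++ [[b, ((i+j : Nat) : Int)]]))) := by
  induction cs with
  | nil =>
    constructor <;> intro i b e acc <;> simp [aLoop, seekIdx, seek3]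
  | cons c t ih =>
    obtain ⟨ih2, ih3⟩ := ih
    constructor
    · intro i b e acc
      by_cases hc : c = '*'
      · subst hc
        have hstep : aLoop ('*' :: t) 2 (i : Int) b e acc = aLoop t 3 ((i : Int) + 1) b e acc := by
          simp [aLoop]
        rw [hstep, seekIdx_star, show ((i : Int) + 1) = ((i+1 : Nat) : Int) by push_cast; ring,
          ih3 (i+1) b e acc]
        cases seek3 t with
        | none => rfl
        | some j =>
          simp only [List.drop_succ_cons,
            show i+1+j+1 = i+j+2 from by omega, show i+1+j = i+j+1 from by omega]
      · have hstep : aLoop (c :: t) 2 (i : Int) b e acc = aLoop t 2 ((i : Int) + 1) b e acc := by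
          simp [aLoop, hc]
        have hseek : seekIdx ['*', '/'] (c :: t) = (seekIdx ['*', '/'] t).map (· + 1) := by
          rw [seekIdx_cons, if_neg (show ¬ (['*','/'] <+: (c :: t)) from ?_)]
          rw [List.cons_prefix_cons]
          exact fun h => hc h.1.symm
        rw [hstep, hseek, show ((i : Int) + 1) = ((i+1 : Nat) : Int) by push_cast; ring,
          ih2 (i+1) b e acc]
        cases seekIdx ['*', '/'] t with
        | none => rfl
        | some j =>
          simp only [Option.map_some, List.drop_succ_cons,
            show i+1+j+2 = i+(j+1)+2 from by omega, show i+1+j+1 = i+(j+1)+1 from by omega]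
    · intro i b e acc
      by_cases hc1 : c = '/'
      · subst hc1
        simp only [seek3, if_pos rfl]
        have hstep : aLoop ('/' :: t) 3 (i : Int) b e acc =
            aLoop t 0 ((i : Int) + 1) b (i : Int) (acc ++ [[b, (i : Int)]]) := by
          simp [aLoop]
        rw [hstep]
        simp only [List.drop_succ_cons, List.drop_zero, Nat.add_zero]
        norm_num
      · by_cases hc2 : c = '*'
        · subst hc2
          have hstep : aLoop ('*' :: t) 3 (i : Int) b e acc = aLoop t 3 ((i : Int) + 1) b e acc := by
            simp [aLoop]
          rw [hstep, show ((i : Int) + 1) = ((i+1 : Nat) : Int) by push_cast; ring,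
            ih3 (i+1) b e acc]
          rw [show seek3 ('*' :: t) = (seek3 t).map (· + 1) from by simp [seek3]]
          cases seek3 t with
          | none => rfl
          | some j =>
            simp only [Option.map_some, List.drop_succ_cons,
              show i+1+j+1 = i+(j+1)+1 from by omega, show i+1+j = i+(j+1) from by omega]
        · have hstep : aLoop (c :: t) 3 (i : Int) b e acc = aLoop t 2 ((i : Int) + 1) b e acc := by
            simp [aLoop, hc1, hc2]
          rw [hstep, show ((i : Int) + 1) = ((i+1 : Nat) : Int) by push_cast; ring,
            ih2 (i+1) b e acc]
          rw [show seek3 (c :: t) = (seekIdx ['*', '/'] t).map (· + 2) from by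
            simp [seek3, hc1, hc2]]
          cases seekIdx ['*', '/'] t with
          | none => rfl
          | some j =>
            simp only [Option.map_some, List.drop_succ_cons,
              show i+1+j+2 = i+(j+2)+1 from by omega, show i+1+j+1 = i+(j+2) from by omega]

theorem aLoop_state4 (cs : List Char) :
    ∀ (i : Nat) (b e : Int) (acc : List (List Int)), aLoop cs 4 (i : Int) b e acc =
      (match seekIdx ['\n'] cs with
       | none => acc ++ [[b, ((i + cs.length : Nat) : Int)]]
       | some j => aLoop (cs.drop (j+1)) 0 ((i+j+1 : Nat) : Int) b ((i+j : Nat) : Int)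
           (acc ++ [[b, ((i+j : Nat) : Int)]])) := by
  induction cs with
  | nil => intro i b e acc; simp [aLoop, seekIdx]
  | cons c t ih =>
    intro i b e acc
    by_cases hc : c = '\n'
    · subst hc
      rw [seekIdx_cons, if_pos (by simp [List.cons_prefix_cons])]
      have hstep : aLoop ('\n' :: t) 4 (i : Int) b e acc =
          aLoop t 0 ((i : Int) + 1) b (i : Int) (acc ++ [[b, (i : Int)]]) := by
        simp [aLoop]
      rw [hstep]
      simp only [List.drop_succ_cons, List.drop_zero, Nat.add_zero]
      norm_num
    · have hstep : aLoop (c :: t) 4 (i : Int) b e acc = aLoop t 4 ((i : Int) + 1) b e acc := by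
        simp [aLoop, hc]
      have hseek : seekIdx ['\n'] (c :: t) = (seekIdx ['\n'] t).map (· + 1) := by
        rw [seekIdx_cons, if_neg (show ¬ (['\n'] <+: (c :: t)) from ?_)]
        rw [List.cons_prefix_cons]
        exact fun h => hc h.1.symm
      rw [hstep, hseek, show ((i : Int) + 1) = ((i+1 : Nat) : Int) by push_cast; ring,
        ih (i+1) b e acc]
      cases seekIdx ['\n'] t with
      | none =>
        simp only [Option.map_none, List.length_cons,
          show i+1+t.length = i+(t.length+1) from by omega]
      | some j =>
        simp only [Option.map_some, List.drop_succ_cons,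
          show i+1+j+1 = i+(j+1)+1 from by omega, show i+1+j = i+(j+1) from by omega]

theorem seekIdx_none_not_prefix {sub : List Char} (hsub : sub ≠ []) :
    ∀ {cs : List Char}, seekIdx sub cs = none → ∀ i, ¬ sub <+: cs.drop i := by
  intro cs
  induction cs with
  | nil => intro _ i hp; simp at hp; exact hsub (by simpa using hp)
  | cons c t ih =>
    intro h i hp
    rw [seekIdx_cons] at h
    split at h
    · simp at h
    · rename_i hnp
      cases i with
      | zero => exact hnp (by simpa using hp)
      | succ i' => exact ih (by simpa using h) i' (by simpa using hp)

theorem seekIdx_some_prefix {sub : List Char} :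
    ∀ {cs : List Char} {j : Nat}, seekIdx sub cs = some j → sub <+: cs.drop j := by
  intro cs
  induction cs with
  | nil => intro j h; simp [seekIdx] at h
  | cons c t ih =>
    intro j h
    rw [seekIdx_cons] at h
    split at h
    · rename_i hp; cases h; simpa using hp
    · obtain ⟨j', hj', rfl⟩ := Option.map_eq_some_iff.mp h
      simpa using ih hj'

theorem seekIdx_some_min {sub : List Char} :
    ∀ {cs : List Char} {j : Nat}, seekIdx sub cs = some j → ∀ i < j, ¬ sub <+: cs.drop i := by
  intro cs
  induction cs with
  | nil => intro j h; simp [seekIdx] at h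
  | cons c t ih =>
    intro j h i hi hp
    rw [seekIdx_cons] at h
    split at h
    · cases h; omega
    · rename_i hnp
      obtain ⟨j', hj', rfl⟩ := Option.map_eq_some_iff.mp h
      cases i with
      | zero => exact hnp (by simpa using hp)
      | succ i' => exact ih hj' i' (by omega) (by simpa using hp)

theorem find_eq_seekIdx {sub : List Char} (hsub : sub ≠ []) (cs : List Char) :
    PySem.Chars.find cs sub = (match seekIdx sub cs with | none => -1 | some j => (j : Int)) := by
  cases hs : seekIdx sub cs with
  | none =>
    rw [PySem.Chars.find_eq_neg_one_iff]
    intro hinf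
    have : PySem.Chars.isIn sub cs = true := (PySem.Chars.isIn_iff_infix sub cs).mpr hinf
    obtain ⟨j, hj⟩ := (PySem.Chars.exists_prefix_drop_iff_isIn sub cs).mpr this
    exact seekIdx_none_not_prefix hsub hs j hj
  | some j =>
    have hpre := seekIdx_some_prefix hs
    have hinf : sub <:+: cs := by
      have : PySem.Chars.isIn sub cs = true :=
        (PySem.Chars.exists_prefix_drop_iff_isIn sub cs).mp ⟨j, hpre⟩
      exact (PySem.Chars.isIn_iff_infix sub cs).mp this
    have hnn : 0 ≤ PySem.Chars.find cs sub := (PySem.Chars.find_nonneg_iff cs sub).mpr hinf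
    obtain ⟨h1, h2⟩ := PySem.Chars.find_spec hnn
    have hj1 : ¬ (PySem.Chars.find cs sub).toNat < j := fun hlt => seekIdx_some_min hs _ hlt h1
    have hj2 : ¬ j < (PySem.Chars.find cs sub).toNat := fun hlt => h2 j hlt hpre
    have : (PySem.Chars.find cs sub).toNat = j := by omega
    show PySem.Chars.find cs sub = (j : Int)
    omega

theorem findFrom_eq_seekIdx (s sub : List Char) (hsub : sub ≠ []) (k : Nat) (hk : k ≤ s.length) :
    PySem.Chars.findFrom s sub ((k : Nat) : Int) =
      (match seekIdx sub (s.drop k) with | none => -1 | some j => ((k + j : Nat) : Int)) := by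
  rw [PySem.Chars.findFrom_natCast s sub k hk, find_eq_seekIdx hsub]
  cases seekIdx sub (s.drop k) with
  | none => simp
  | some j => simp

theorem aLoop_eq_bLoop_aux (s : List Char) :
    ∀ (k i : Nat) (b e : Int) (acc : List (List Int)), s.length - i ≤ k →
      aLoop (s.drop i) 0 (i : Int) b e acc = bLoop s i acc := by
  intro k
  induction k with
  | zero =>
    intro i b e acc hk
    have hge : s.length ≤ i := by omega
    rw [List.drop_eq_nil_iff.mpr (by omega), bLoop, dif_neg (by omega)]
    simp [aLoop]
  | succ k ihk =>
    intro i b e acc hk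
    by_cases h : i < s.length
    · rw [List.drop_eq_getElem_cons h, bLoop, dif_pos h]
      by_cases hc : s[i] = '/'
      · rw [if_neg (by simp [hc])]
        have hstep : aLoop (s[i] :: s.drop (i+1)) 0 (i : Int) b e acc
            = aLoop (s.drop (i+1)) 1 ((i : Int)+1) (i : Int) e acc := by
          simp [aLoop, hc]
        rw [hstep]
        by_cases h2 : i + 1 < s.length
        · rw [dif_pos h2, List.drop_eq_getElem_cons h2]
          by_cases hd : s[i+1] = '*'
          · -- block comment
            rw [if_pos hd]
            have hstep2 : aLoop (s[i+1] :: s.drop (i+2)) 1 ((i : Int)+1) (i : Int) e acc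
                = aLoop (s.drop (i+2)) 2 ((i : Int)+1+1) (i : Int) e acc := by
              simp [aLoop, hd]
            rw [hstep2, show ((i : Int)+1+1) = ((i+2 : Nat) : Int) by push_cast; ring,
              (aLoop_state23 (s.drop (i+2))).1 (i+2) (i : Int) e acc]
            have hff := findFrom_eq_seekIdx s ['*', '/'] (by decide) (i+2) (by omega)
            cases hseek : seekIdx ['*', '/'] (s.drop (i+2)) with
            | none =>
              have hff2 : PySem.Chars.findFrom s ['*', '/'] ((i+2 : Nat) : Int) = -1 := by
                rw [hff, hseek]
              simp only [hff2]
              simp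
            | some j =>
              have hff2 : PySem.Chars.findFrom s ['*', '/'] ((i+2 : Nat) : Int)
                  = ((i+2+j : Nat) : Int) := by rw [hff, hseek]
              simp only [hff2]
              rw [dif_neg (by push_cast; omega)]
              rw [List.drop_drop, Int.toNat_natCast,
                show ((i+2+j : Nat) : Int) + 1 = ((i+2+j+1 : Nat) : Int) by push_cast; ring]
              exact ihk (i+2+j+2) (i : Int) ((i+2+j+1 : Nat) : Int) _ (by omega)
          · by_cases hd2 : s[i+1] = '/'
            · -- line comment
              rw [if_neg hd, if_pos hd2]
              have hstep2 : aLoop (s[i+1] :: s.drop (i+2)) 1 ((i : Int)+1) (i : Int) e acc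
                  = aLoop (s.drop (i+2)) 4 ((i : Int)+1+1) (i : Int) e acc := by
                simp [aLoop, hd2, hd]
              rw [hstep2, show ((i : Int)+1+1) = ((i+2 : Nat) : Int) by push_cast; ring,
                aLoop_state4 (s.drop (i+2)) (i+2) (i : Int) e acc]
              have hff := findFrom_eq_seekIdx s ['\n'] (by decide) (i+2) (by omega)
              cases hseek : seekIdx ['\n'] (s.drop (i+2)) with
              | none =>
                have hff2 : PySem.Chars.findFrom s ['\n'] ((i+2 : Nat) : Int) = -1 := by
                  rw [hff, hseek]
                simp only [hff2, ne_eq, not_true_eq_false, if_false, List.length_drop]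
                rw [show i+2+(s.length-(i+2)) = s.length from by omega]
                rw [bLoop, dif_neg (by omega)]
              | some j =>
                have hff2 : PySem.Chars.findFrom s ['\n'] ((i+2 : Nat) : Int)
                    = ((i+2+j : Nat) : Int) := by rw [hff, hseek]
                simp only [hff2]
                rw [if_pos (by push_cast; omega)]
                rw [List.drop_drop, Int.toNat_natCast]
                exact ihk (i+2+j+1) (i : Int) ((i+2+j : Nat) : Int) _ (by omega)
            · -- '/' followed by an ordinary character: both consume two characters
              rw [if_neg hd, if_neg hd2]
              have hstep2 : aLoop (s[i+1] :: s.drop (i+2)) 1 ((i : Int)+1) (i : Int) e acc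
                  = aLoop (s.drop (i+2)) 0 ((i : Int)+1+1) (i : Int) e acc := by
                simp [aLoop, hd, hd2]
              rw [hstep2, show ((i : Int)+1+1) = ((i+2 : Nat) : Int) by push_cast; ring]
              exact ihk (i+2) (i : Int) e acc (by omega)
        · -- '/' is the last character
          rw [dif_neg h2, List.drop_eq_nil_iff.mpr (by omega)]
          rw [show aLoop [] 1 ((i : Int)+1) (i : Int) e acc = acc from by simp [aLoop]]
          rw [bLoop, dif_neg (by omega)]
      · rw [if_pos (by simp [hc])]
        have hstep : aLoop (s[i] :: s.drop (i+1)) 0 (i : Int) b e acc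
            = aLoop (s.drop (i+1)) 0 ((i : Int)+1) b e acc := by
          simp [aLoop, hc]
        rw [hstep, show ((i : Int)+1) = ((i+1 : Nat) : Int) by push_cast; ring]
        exact ihk (i+1) b e acc (by omega)
    · rw [List.drop_eq_nil_iff.mpr (by omega), bLoop, dif_neg (by omega)]
      simp [aLoop]

theorem aLoop_eq_bLoop (s : List Char) (b e : Int) :
    aLoop s 0 0 b e [] = bLoop s 0 [] := by
  have := aLoop_eq_bLoop_aux s s.length 0 b e [] (by omega)
  simpa using this

-- ===== VERDICT (by name: the statement is the Claim_ definition above) =====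
theorem readComments_spec : Claim_equal_readComments := by
  intro prog _
  unfold Spec_readComments readComments readComments_alt
  exact aLoop_eq_bLoop prog.toList 0 0
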